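-- pv_equiv track=rewrite | github.com/richieyuyongpoh/Supply-Chain-Sentinel-Agent | main.py | get_mitigation_plan
-- ===== SOURCE A (Python) =====
-- def get_mitigation_plan(events):
--     """Generates high-level mitigation plans for each event."""
--     plans = []
--     for event in events:
--         plan = f"**For the '{event['type']}' event:** "
--         if 'Port Congestion' in event['type']:
--             plan += "Engage freight forwarder to assess alternative sea/air routes. Increase monitoring frequency."
--         elif 'Geopolitical Tension' in event['type']:
--             plan += "Review inventory levels for all components from the affected region. Place early orders with secondary suppliers."
--         elif 'Production Slowdown' in event['type']:
--             plan += "Contact supplier immediately for root cause analysis and a firm recovery timeline. Assess impact on production schedule."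
--         elif 'Demand Spike' in event['type']:
--             plan += "Alert Sales & Operations Planning (S&OP) team. Validate if spike is temporary or a new baseline."
--         plans.append(plan)
--     return plans
-- ===== SOURCE B (Python) =====
-- _MITIGATION_RULES = [
--     ('Port Congestion', "Engage freight forwarder to assess alternative sea/air routes. Increase monitoring frequency."),
--     ('Geopolitical Tension', "Review inventory levels for all components from the affected region. Place early orders with secondary suppliers."),
--     ('Production Slowdown', "Contact supplier immediately for root cause analysis and a firm recovery timeline. Assess impact on production schedule."),
--     ('Demand Spike', "Alert Sales & Operations Planning (S&OP) team. Validate if spike is temporary or a new baseline."),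
-- ]
--
--
-- def get_mitigation_plan(events):
--     """Generates high-level mitigation plans for each event.
--
--     Transposed strategy: instead of running a rule chain per event, make one
--     pass over ALL events per rule (in priority order), filling each event's
--     advice slot only if it is still empty - which preserves first-match-wins.
--     """
--     types = [event['type'] for event in events]
--     suffixes = [None] * len(types)
--     for phrase, advice in _MITIGATION_RULES:
--         for i, etype in enumerate(types):
--             if suffixes[i] is None and phrase in etype:
--                 suffixes[i] = advice
--     return ["**For the '%s' event:** %s" % (t, s if s is not None else "")
--             for t, s in zip(types, suffixes)]
-- ===== Notes on version B (the rewrite author's own statement) =====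
-- stated objective: alternative
-- what changed: Transposes the loops: instead of an if/elif rule chain per event, B extracts all type strings, then makes one pass over all events per rule in priority order, filling each event's advice slot only while it is still empty (preserving first-match-wins), and finally zips prefixes with the filled slots.
import Mathlib
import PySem

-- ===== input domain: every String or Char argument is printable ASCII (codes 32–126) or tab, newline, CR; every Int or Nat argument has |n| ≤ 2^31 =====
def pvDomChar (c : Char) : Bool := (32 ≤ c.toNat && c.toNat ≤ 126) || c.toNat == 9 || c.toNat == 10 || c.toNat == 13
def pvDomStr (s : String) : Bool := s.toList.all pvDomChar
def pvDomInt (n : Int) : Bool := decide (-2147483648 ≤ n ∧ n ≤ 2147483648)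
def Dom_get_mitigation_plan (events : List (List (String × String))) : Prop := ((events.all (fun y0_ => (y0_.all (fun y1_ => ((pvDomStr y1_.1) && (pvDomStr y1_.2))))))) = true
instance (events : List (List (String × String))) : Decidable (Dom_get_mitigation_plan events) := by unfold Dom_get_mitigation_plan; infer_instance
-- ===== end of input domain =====

-- B transposes the loops: one pass over all events per rule (priority order, fill-if-empty)
-- instead of A's per-event if/elif chain (alternative decomposition; same cost).

-- dict lookup event['type'] on an association list: first match (Pre_ guarantees the key exists)
def pvTypeOf (event : List (String × String)) : String :=
  ((event.find? (fun p => p.1 == "type")).map (·.2)).getD ""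

-- ===== PORT A =====
def get_mitigation_plan (events : List (List (String × String))) : List String :=
  events.foldl
    (fun plans event =>
      let t := pvTypeOf event
      let plan := "**For the '" ++ t ++ "' event:** "
      let plan :=
        if PySem.Str.isIn "Port Congestion" t then
          plan ++ "Engage freight forwarder to assess alternative sea/air routes. Increase monitoring frequency."
        else if PySem.Str.isIn "Geopolitical Tension" t then
          plan ++ "Review inventory levels for all components from the affected region. Place early orders with secondary suppliers."
        else if PySem.Str.isIn "Production Slowdown" t then
          plan ++ "Contact supplier immediately for root cause analysis and a firm recovery timeline. Assess impact on production schedule."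
        else if PySem.Str.isIn "Demand Spike" t then
          plan ++ "Alert Sales & Operations Planning (S&OP) team. Validate if spike is temporary or a new baseline."
        else plan
      plans ++ [plan])
    []

-- ===== PORT B =====
def pvRules : List (String × String) :=
  [("Port Congestion", "Engage freight forwarder to assess alternative sea/air routes. Increase monitoring frequency."),
   ("Geopolitical Tension", "Review inventory levels for all components from the affected region. Place early orders with secondary suppliers."),
   ("Production Slowdown", "Contact supplier immediately for root cause analysis and a firm recovery timeline. Assess impact on production schedule."),
   ("Demand Spike", "Alert Sales & Operations Planning (S&OP) team. Validate if spike is temporary or a new baseline.")]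

-- one pass of B's inner loop: fill still-empty slots where the phrase occurs
def pvPass (phrase advice : String) (types : List String) (suffixes : List (Option String)) : List (Option String) :=
  (types.zip suffixes).map (fun p => if p.2.isNone && PySem.Str.isIn phrase p.1 then some advice else p.2)

def get_mitigation_plan_alt (events : List (List (String × String))) : List String :=
  let types := events.map pvTypeOf
  let suffixes := pvRules.foldl (fun suf kv => pvPass kv.1 kv.2 types suf) (List.replicate types.length none)
  (types.zip suffixes).map (fun p => "**For the '" ++ p.1 ++ "' event:** " ++ p.2.getD "")

-- ===== PRECONDITION & SPEC =====
-- Pre_ excludes events without a 'type' key, where the Python A (and B) raise KeyError.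
def Pre_get_mitigation_plan (events : List (List (String × String))) : Prop :=
  events.all (fun e => e.any (fun p => p.1 == "type")) = true
instance (events : List (List (String × String))) : Decidable (Pre_get_mitigation_plan events) := by unfold Pre_get_mitigation_plan; infer_instance
def pvWitness_get_mitigation_plan : (List (List (String × String))) := [[("type", "Demand Spike")]]

def Spec_get_mitigation_plan (events : List (List (String × String))) (out : List String) : Prop := out = get_mitigation_plan_alt events
instance (events : List (List (String × String))) (out : List String) : Decidable (Spec_get_mitigation_plan events out) := by unfold Spec_get_mitigation_plan; infer_instance

-- ===== CLAIM (what is proved, stated in full; the proofs are below) =====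
def Claim_equal_get_mitigation_plan : Prop := ∀ (events : List (List (String × String))), Dom_get_mitigation_plan events → Pre_get_mitigation_plan events → Spec_get_mitigation_plan events (get_mitigation_plan events)

-- ===== LEMMAS AND PROOFS =====

-- the per-element result of folding a rule list over a single slot
def pvChainOpt (rules : List (String × String)) (t : String) : Option String :=
  rules.foldl (fun o kv => if o.isNone && PySem.Str.isIn kv.1 t then some kv.2 else o) none

-- folding the passes over a cons decomposes pointwise
lemma foldPass_cons (rules : List (String × String)) (t : String) (ts : List String)
    (s : Option String) (suf : List (Option String)) :
    rules.foldl (fun acc kv => pvPass kv.1 kv.2 (t :: ts) acc) (s :: suf)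
      = (rules.foldl (fun o kv => if o.isNone && PySem.Str.isIn kv.1 t then some kv.2 else o) s)
        :: rules.foldl (fun acc kv => pvPass kv.1 kv.2 ts acc) suf := by
  induction rules generalizing s suf with
  | nil => simp
  | cons kv rest ih =>
    simp only [List.foldl, pvPass, List.zip_cons_cons, List.map]
    exact ih _ _

-- the fold of passes over the whole list equals the pointwise map
lemma foldPass_map (types : List String) :
    pvRules.foldl (fun suf kv => pvPass kv.1 kv.2 types suf) (List.replicate types.length none)
      = types.map (pvChainOpt pvRules) := by
  induction types with
  | nil =>
    simp [pvRules, pvPass]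
  | cons t ts ih =>
    simp only [List.length_cons, List.replicate_succ, List.map]
    rw [foldPass_cons, ih]
    rfl

-- B's per-element suffix equals A's if/elif chain result
lemma chainOpt_eq (t : String) :
    (pvChainOpt pvRules t).getD "" =
      (if PySem.Str.isIn "Port Congestion" t then
        "Engage freight forwarder to assess alternative sea/air routes. Increase monitoring frequency."
      else if PySem.Str.isIn "Geopolitical Tension" t then
        "Review inventory levels for all components from the affected region. Place early orders with secondary suppliers."
      else if PySem.Str.isIn "Production Slowdown" t then
        "Contact supplier immediately for root cause analysis and a firm recovery timeline. Assess impact on production schedule."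
      else if PySem.Str.isIn "Demand Spike" t then
        "Alert Sales & Operations Planning (S&OP) team. Validate if spike is temporary or a new baseline."
      else "") := by
  by_cases h1 : PySem.Str.isIn "Port Congestion" t = true <;>
    by_cases h2 : PySem.Str.isIn "Geopolitical Tension" t = true <;>
      by_cases h3 : PySem.Str.isIn "Production Slowdown" t = true <;>
        by_cases h4 : PySem.Str.isIn "Demand Spike" t = true <;>
          (try simp at h1 h2 h3 h4) <;>
          simp [pvChainOpt, pvRules, h1, h2, h3, h4]

-- zipping a list with its own map and mapping collapses to a single map
lemma zip_self_map {α β γ : Type} (f : α → β) (g : α × β → γ) (l : List α) :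
    ((l.zip (l.map f)).map g) = l.map (fun a => g (a, f a)) := by
  induction l with
  | nil => rfl
  | cons a l ih => simp [ih]

-- A's accumulator loop produces acc ++ the per-event map
lemma foldl_plans (events : List (List (String × String))) (acc : List String) :
    events.foldl
      (fun plans event =>
        let t := pvTypeOf event
        let plan := "**For the '" ++ t ++ "' event:** "
        let plan :=
          if PySem.Str.isIn "Port Congestion" t then
            plan ++ "Engage freight forwarder to assess alternative sea/air routes. Increase monitoring frequency."
          else if PySem.Str.isIn "Geopolitical Tension" t then
            plan ++ "Review inventory levels for all components from the affected region. Place early orders with secondary suppliers."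
          else if PySem.Str.isIn "Production Slowdown" t then
            plan ++ "Contact supplier immediately for root cause analysis and a firm recovery timeline. Assess impact on production schedule."
          else if PySem.Str.isIn "Demand Spike" t then
            plan ++ "Alert Sales & Operations Planning (S&OP) team. Validate if spike is temporary or a new baseline."
          else plan
        plans ++ [plan]) acc
    = acc ++ events.map (fun e =>
        "**For the '" ++ pvTypeOf e ++ "' event:** " ++ (pvChainOpt pvRules (pvTypeOf e)).getD "") := by
  induction events generalizing acc with
  | nil => simp
  | cons e rest ih =>
    simp only [List.foldl, List.map, ih]
    rw [chainOpt_eq (pvTypeOf e)]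
    by_cases h1 : PySem.Str.isIn "Port Congestion" (pvTypeOf e) = true <;>
      by_cases h2 : PySem.Str.isIn "Geopolitical Tension" (pvTypeOf e) = true <;>
        by_cases h3 : PySem.Str.isIn "Production Slowdown" (pvTypeOf e) = true <;>
          by_cases h4 : PySem.Str.isIn "Demand Spike" (pvTypeOf e) = true <;>
            (try simp at h1 h2 h3 h4) <;>
            simp [h1, h2, h3, h4]

-- ===== VERDICT (by name: the statement is the Claim_ definition above) =====
theorem get_mitigation_plan_spec : Claim_equal_get_mitigation_plan := by
  intro events _ _
  unfold Spec_get_mitigation_plan get_mitigation_plan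
  simp only [get_mitigation_plan_alt, foldPass_map, zip_self_map]
  rw [foldl_plans]
  simp
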